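-- pv_equiv track=rewrite | github.com/EliYayyyyyy/AutoChem | IDT Chemical Modification.py | modify_dna_sequence
-- ===== SOURCE A (Python) =====
-- def modify_dna_sequence(sequence):
--     modified_sequence = ""
--     for index, base in enumerate(sequence):
--         if index == 0:  # 5' base
--             modified_sequence += "/52MOEr" + base + "/*"
--         elif index == len(sequence) - 1:  # 3' base
--             modified_sequence += "/32MOEr" + base + "/"
--         else:  # Internal base
--             modified_sequence += "/i2MOEr" + base + "/*"
--     return modified_sequence
-- ===== SOURCE B (Python) =====
-- def modify_dna_sequence(sequence):
--     n = len(sequence)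
--     if n <= 1:
--         prefixes = ["/52MOEr"] * n
--         suffixes = ["/*"] * n
--     else:
--         prefixes = ["/52MOEr"] + ["/i2MOEr"] * (n - 2) + ["/32MOEr"]
--         suffixes = ["/*"] * (n - 1) + ["/"]
--     return "".join(p + b + s for p, b, s in zip(prefixes, sequence, suffixes))
-- ===== Notes on version B (the rewrite author's own statement) =====
-- stated objective: alternative
-- what changed: Replaces A's per-element index-branching loop with quadratic += by a table formulation: prefix and suffix tag tables are built arithmetically from the length (replication and concatenation, no per-element test), then a single zip of (prefix, base, suffix) triples is joined once.
import Mathlib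
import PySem

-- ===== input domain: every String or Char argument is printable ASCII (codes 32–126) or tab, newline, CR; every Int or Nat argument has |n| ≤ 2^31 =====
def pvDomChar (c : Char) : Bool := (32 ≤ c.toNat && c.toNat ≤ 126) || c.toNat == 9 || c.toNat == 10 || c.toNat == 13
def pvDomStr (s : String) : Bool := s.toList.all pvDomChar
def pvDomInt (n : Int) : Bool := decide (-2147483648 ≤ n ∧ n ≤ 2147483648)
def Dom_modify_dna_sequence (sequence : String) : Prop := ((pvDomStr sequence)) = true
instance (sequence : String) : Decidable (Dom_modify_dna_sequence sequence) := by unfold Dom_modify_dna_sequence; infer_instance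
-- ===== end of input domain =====

-- B replaces A's per-index branching loop by arithmetically built prefix/suffix tag
-- tables zipped with the bases and joined once (objective: alternative formulation).

-- ===== PORT A =====
-- A's loop body: branch on the enumeration index against 0 and len-1.
def pvABody (n : Nat) (acc : List Char) (p : Int × Char) : List Char :=
  if p.1 = 0 then acc ++ ("/52MOEr".toList ++ [p.2] ++ "/*".toList)
  else if p.1 = (n : Int) - 1 then acc ++ ("/32MOEr".toList ++ [p.2] ++ "/".toList)
  else acc ++ ("/i2MOEr".toList ++ [p.2] ++ "/*".toList)

def modify_dna_sequence (sequence : String) : String :=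
  String.mk ((PySem.List.enumerate sequence.toList 0).foldl
    (pvABody sequence.toList.length) [])

-- ===== PORT B =====
def modify_dna_sequence_alt (sequence : String) : String :=
  let l := sequence.toList
  let n := l.length
  let prefixes : List (List Char) :=
    if n ≤ 1 then List.replicate n "/52MOEr".toList
    else ["/52MOEr".toList] ++ List.replicate (n - 2) "/i2MOEr".toList ++ ["/32MOEr".toList]
  let suffixes : List (List Char) :=
    if n ≤ 1 then List.replicate n "/*".toList
    else List.replicate (n - 1) "/*".toList ++ ["/".toList]
  String.mk (((List.zip (List.zip prefixes l) suffixes).map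
    (fun pbs => pbs.1.1 ++ [pbs.1.2] ++ pbs.2)).flatten)

-- ===== PRECONDITION & SPEC =====
def Spec_modify_dna_sequence (sequence : String) (out : String) : Prop := out = modify_dna_sequence_alt sequence
instance (sequence : String) (out : String) : Decidable (Spec_modify_dna_sequence sequence out) := by unfold Spec_modify_dna_sequence; infer_instance

-- ===== CLAIM (what is proved, stated in full; the proofs are below) =====
def Claim_equal_modify_dna_sequence : Prop := ∀ (sequence : String), Dom_modify_dna_sequence sequence → Spec_modify_dna_sequence sequence (modify_dna_sequence sequence)

-- ===== LEMMAS AND PROOFS =====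

def pvTag5 (c : Char) : List Char := "/52MOEr".toList ++ [c] ++ "/*".toList
def pvTagI (c : Char) : List Char := "/i2MOEr".toList ++ [c] ++ "/*".toList
def pvTag3 (c : Char) : List Char := "/32MOEr".toList ++ [c] ++ "/".toList

-- After the first element A's index is ≥ 1, so only the last-vs-interior branches fire:
-- the fold appends an interior tag per element of l.dropLast and a 3' tag for l's last.
theorem pvFoldA (l : List Char) (n : Nat) (s : Int) (acc : List Char)
    (hs : 1 ≤ s) (hn : s + l.length = (n : Int)) :
    (PySem.List.enumerate l s).foldl (pvABody n) acc
      = acc ++ (l.dropLast.map pvTagI).flatten ++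
          (match l.getLast? with | some t => pvTag3 t | none => []) := by
  induction l generalizing s acc with
  | nil => simp [PySem.List.enumerate_nil]
  | cons x xs ih =>
    rw [PySem.List.enumerate_cons]
    cases xs with
    | nil =>
      have h1 : s = (n : Int) - 1 := by simp at hn; omega
      have h0 : ¬ s = 0 := by omega
      simp only [PySem.List.enumerate_nil, List.foldl_cons, List.foldl_nil,
        pvABody, if_neg h0, if_pos h1]
      simp [pvTag3]
    | cons y ys =>
      have h0 : ¬ s = 0 := by omega
      have h1 : ¬ s = (n : Int) - 1 := by
        simp only [List.length_cons] at hn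
        push_cast at hn
        omega
      have hn' : (s + 1) + ((y :: ys : List Char).length : Int) = (n : Int) := by
        simp only [List.length_cons] at hn ⊢
        push_cast at hn ⊢
        omega
      have := ih (s + 1) (acc ++ ("/i2MOEr".toList ++ [x] ++ "/*".toList)) (by omega) hn'
      simp only [List.foldl_cons, pvABody, if_neg h0, if_neg h1]
      rw [this]
      simp [pvTagI, List.dropLast_cons_of_ne_nil, List.getLast?_cons_cons]

-- B's zip of the tail tables (interior prefixes + the 3' prefix, interior suffixes +
-- the final "/") produces exactly the interior tags of m.dropLast plus the 3' tag of m's last.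
theorem pvZipB (m : List Char) (hm : m ≠ []) :
    ((List.zip (List.zip (List.replicate (m.length - 1) "/i2MOEr".toList ++ ["/32MOEr".toList]) m)
        (List.replicate (m.length - 1) "/*".toList ++ ["/".toList])).map
      (fun pbs => pbs.1.1 ++ [pbs.1.2] ++ pbs.2)).flatten
    = (m.dropLast.map pvTagI).flatten ++
        (match m.getLast? with | some t => pvTag3 t | none => []) := by
  induction m with
  | nil => exact absurd rfl hm
  | cons x xs ih =>
    cases xs with
    | nil => simp [pvTag3]
    | cons y ys =>
      have hlen : (x :: y :: ys : List Char).length - 1 = ((y :: ys : List Char).length - 1) + 1 := by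
        simp
      rw [hlen]
      simp only [List.replicate_succ, List.cons_append, List.zip_cons_cons,
        List.map_cons, List.flatten_cons]
      rw [ih (by simp)]
      simp [pvTagI, List.dropLast_cons_of_ne_nil, List.getLast?_cons_cons]

-- ===== VERDICT (by name: the statement is the Claim_ definition above) =====
theorem modify_dna_sequence_spec : Claim_equal_modify_dna_sequence := by
  intro sequence _
  unfold Spec_modify_dna_sequence modify_dna_sequence modify_dna_sequence_alt
  cases h : sequence.toList with
  | nil => decide
  | cons c rest =>
    have hb : pvABody (c :: rest).length [] (0, c) = pvTag5 c := by
      simp [pvABody, pvTag5]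
    have hf := pvFoldA rest (c :: rest).length 1 (pvTag5 c) (le_refl 1)
      (by simp only [List.length_cons]; push_cast; ring)
    rw [PySem.List.enumerate_cons, List.foldl_cons, hb, zero_add, hf]
    cases rest with
    | nil => simp [pvTag5]
    | cons y ys =>
      have hn1 : ¬ (c :: y :: ys : List Char).length ≤ 1 := by simp
      simp only [if_neg hn1]
      have hl2 : (c :: y :: ys : List Char).length - 2 = (y :: ys : List Char).length - 1 := by
        simp
      have hl1 : (c :: y :: ys : List Char).length - 1 = ((y :: ys : List Char).length - 1) + 1 := by
        simp
      rw [hl2, hl1]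
      simp only [List.nil_append, List.replicate_succ, List.cons_append,
        List.zip_cons_cons, List.map_cons, List.flatten_cons]
      rw [pvZipB (y :: ys) (by simp)]
      simp [pvTag5]
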